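-- pv_equiv track=rewrite | github.com/renatobardi/oute-muscle | apps/api/src/routes/scans.py | _compute_risk_level
-- ===== SOURCE A (Python) =====
-- from typing import Any
--
-- def _compute_risk_level(findings: list[dict[str, Any]]) -> str:
--     """Derive risk level from highest severity finding.
--
--     Args:
--         findings: List of findings from L1
--
--     Returns:
--         Risk level: critical, high, medium, low
--     """
--     if not findings:
--         return "low"
--     severities = {f.get("severity", "low") for f in findings}
--     for level in ("critical", "high", "medium", "low"):
--         if level in severities:
--             return level
--     return "low"
-- ===== SOURCE B (Python) =====
-- _RANK = {"low": 1, "medium": 2, "high": 3, "critical": 4}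
--
-- def _name(r):
--     if r == 4:
--         return "critical"
--     if r == 3:
--         return "high"
--     if r == 2:
--         return "medium"
--     return "low"
--
-- def _compute_risk_level(findings):
--     best = 0
--     for f in findings:
--         best = max(best, _RANK.get(f.get("severity", "low"), 0))
--     return _name(best)
-- ===== Notes on version B (the rewrite author's own statement) =====
-- stated objective: simpler
-- what changed: Replaces A's build-a-set-then-scan-fixed-priority-levels with a single max-reduction pass over numeric severity ranks mapped back to a name.
import Mathlib
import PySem

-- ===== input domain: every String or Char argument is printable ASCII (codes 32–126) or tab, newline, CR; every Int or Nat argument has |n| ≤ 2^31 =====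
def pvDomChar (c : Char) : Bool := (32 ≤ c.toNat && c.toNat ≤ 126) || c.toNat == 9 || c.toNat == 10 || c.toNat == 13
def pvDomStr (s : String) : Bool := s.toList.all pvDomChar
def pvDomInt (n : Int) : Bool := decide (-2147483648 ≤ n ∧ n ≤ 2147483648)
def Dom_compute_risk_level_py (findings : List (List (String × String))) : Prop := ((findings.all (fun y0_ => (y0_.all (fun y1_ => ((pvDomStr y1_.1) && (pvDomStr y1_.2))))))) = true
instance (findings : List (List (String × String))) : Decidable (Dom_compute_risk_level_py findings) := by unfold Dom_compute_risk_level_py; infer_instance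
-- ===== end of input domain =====

-- B replaces A's build-a-set-then-scan-fixed-priorities with a single max-reduction
-- pass over numeric severity ranks mapped back to a name (objective: simpler).


-- ===== PORT A =====
def compute_risk_level_py (findings : List (List (String × String))) : String :=
  if findings = [] then "low"
  else
    let severities : PySem.Set String :=
      PySem.Set.ofList (findings.map (fun f => PySem.Dict.getD (PySem.Dict.mk f) "severity" "low"))
    if PySem.Set.contains severities "critical" then "critical"
    else if PySem.Set.contains severities "high" then "high"
    else if PySem.Set.contains severities "medium" then "medium"
    else if PySem.Set.contains severities "low" then "low"
    else "low"

-- ===== PORT B =====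
def pvRank (s : String) : Nat :=
  if s = "low" then 1 else if s = "medium" then 2 else if s = "high" then 3
  else if s = "critical" then 4 else 0

def pvName (r : Nat) : String :=
  if r = 4 then "critical" else if r = 3 then "high" else if r = 2 then "medium" else "low"

def compute_risk_level_py_alt (findings : List (List (String × String))) : String :=
  pvName (findings.foldl (fun b f => max b (pvRank (PySem.Dict.getD (PySem.Dict.mk f) "severity" "low"))) 0)

-- ===== PRECONDITION & SPEC =====
def Spec_compute_risk_level_py (findings : List (List (String × String))) (out : String) : Prop := out = compute_risk_level_py_alt findings
instance (findings : List (List (String × String))) (out : String) : Decidable (Spec_compute_risk_level_py findings out) := by unfold Spec_compute_risk_level_py; infer_instance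

-- ===== CLAIM (what is proved, stated in full; the proofs are below) =====
def Claim_equal_compute_risk_level_py : Prop := ∀ (findings : List (List (String × String))), Dom_compute_risk_level_py findings → Spec_compute_risk_level_py findings (compute_risk_level_py findings)

-- ===== LEMMAS AND PROOFS =====

theorem pv_le_foldl_max (l : List Nat) (a : Nat) : a ≤ l.foldl max a := by
  induction l generalizing a with
  | nil => simp
  | cons x xs ih => exact le_trans (Nat.le_max_left a x) (ih (max a x))

theorem pv_mem_le_foldl_max (l : List Nat) (a x : Nat) (hx : x ∈ l) : x ≤ l.foldl max a := by
  induction l generalizing a with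
  | nil => cases hx
  | cons y ys ih =>
    rcases List.mem_cons.mp hx with h | h
    · subst h; exact le_trans (Nat.le_max_right a x) (pv_le_foldl_max ys _)
    · exact ih _ h

theorem pv_foldl_max_le (l : List Nat) (a c : Nat) (ha : a ≤ c) (h : ∀ x ∈ l, x ≤ c) :
    l.foldl max a ≤ c := by
  induction l generalizing a with
  | nil => simpa
  | cons y ys ih =>
    exact ih _ (max_le ha (h y (List.mem_cons_self))) (fun x hx => h x (List.mem_cons_of_mem _ hx))

theorem pv_rank_le (s : String) : pvRank s ≤ 4 := by
  unfold pvRank; split_ifs <;> omega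

theorem pv_main (findings : List (List (String × String))) :
    compute_risk_level_py findings = compute_risk_level_py_alt findings := by
  have hfold : ∀ (l : List (List (String × String))) (a : Nat),
      l.foldl (fun b f => max b (pvRank (PySem.Dict.getD (PySem.Dict.mk f) "severity" "low"))) a
        = ((l.map (fun f => PySem.Dict.getD (PySem.Dict.mk f) "severity" "low")).map pvRank).foldl max a := by
    intro l
    induction l with
    | nil => intro a; rfl
    | cons x xs ih => intro a; simp [List.foldl_cons, ih]
  unfold compute_risk_level_py compute_risk_level_py_alt
  rw [hfold]
  set L := findings.map (fun f => PySem.Dict.getD (PySem.Dict.mk f) "severity" "low") with hL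
  set M := (L.map pvRank).foldl max 0 with hM
  have hMle : ∀ c, (∀ s ∈ L, pvRank s ≤ c) → M ≤ c := fun c h =>
    pv_foldl_max_le _ _ _ (Nat.zero_le c) (by
      intro x hx
      rcases List.mem_map.mp hx with ⟨s, hs, rfl⟩
      exact h s hs)
  have hleM : ∀ s ∈ L, pvRank s ≤ M := fun s hs =>
    pv_mem_le_foldl_max _ _ _ (List.mem_map_of_mem hs)
  by_cases hnil : findings = []
  · subst hnil; simp [hM, hL, pvName]
  · simp only [if_neg hnil]
    by_cases hc : "critical" ∈ L
    · have h4 : M = 4 := le_antisymm (hMle 4 (fun s _ => pv_rank_le s))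
        (by have := hleM _ hc; simpa [pvRank] using this)
      simp [hc, h4, pvName]
    · have hnc : ∀ s ∈ L, s ≠ "critical" := fun s hs h => hc (h ▸ hs)
      have hle3 : M ≤ 3 := hMle 3 (fun s hs => by
        have := hnc s hs; unfold pvRank; split_ifs <;> simp_all)
      by_cases hh : "high" ∈ L
      · have h3 : M = 3 := le_antisymm hle3
          (by have := hleM _ hh; simpa [pvRank] using this)
        simp [hc, hh, h3, pvName]
      · have hnh : ∀ s ∈ L, s ≠ "high" := fun s hs h => hh (h ▸ hs)
        have hle2 : M ≤ 2 := hMle 2 (fun s hs => by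
          have := hnc s hs; have := hnh s hs; unfold pvRank; split_ifs <;> simp_all)
        by_cases hm : "medium" ∈ L
        · have h2 : M = 2 := le_antisymm hle2
            (by have := hleM _ hm; simpa [pvRank] using this)
          simp [hc, hh, hm, h2, pvName]
        · have hnm : ∀ s ∈ L, s ≠ "medium" := fun s hs h => hm (h ▸ hs)
          have hle1 : M ≤ 1 := hMle 1 (fun s hs => by
            have := hnc s hs; have := hnh s hs; have := hnm s hs
            unfold pvRank; split_ifs <;> simp_all)
          have hname : pvName M = "low" := by
            interval_cases M <;> simp [pvName]
          by_cases hl : "low" ∈ L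
          · simp [hc, hh, hm, hl, hname]
          · simp [hc, hh, hm, hl, hname]

theorem compute_risk_level_py_spec : Claim_equal_compute_risk_level_py := by
  intro findings _dom
  exact pv_main findings
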